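-- pv_equiv track=rewrite | github.com/gmltmd23/Algorithm-Study | 2022 Study/Implementation/[구현] 프로그래머스_LEVEL2_프렌즈4블록.py | deleteTwoByTwo
-- ===== SOURCE A (Python) =====
-- def deleteTwoByTwo(twoByTwoList, board):
--     deleteCount = 0
--     while twoByTwoList:
--         x, y = twoByTwoList.pop()
--         for i in range(x, x + 2):
--             for j in range(y, y + 2):
--                 if board[i][j] != '0':
--                     deleteCount += 1
--                     board[i][j] = '0'
--     return deleteCount
-- ===== SOURCE B (Python) =====
-- def deleteTwoByTwo(twoByTwoList, board):
--     # Collect every covered cell once, drain the block list, then one flat pass.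
--     # Like the original, this mutates board in place and empties twoByTwoList.
--     cells = set()
--     for x, y in twoByTwoList:
--         for i in (x, x + 1):
--             for j in (y, y + 1):
--                 cells.add((i, j))
--     twoByTwoList.clear()
--     count = 0
--     for i, j in cells:
--         if board[i][j] != '0':
--             count += 1
--             board[i][j] = '0'
--     return count
-- ===== Notes on version B (the rewrite author's own statement) =====
-- stated objective: alternative
-- what changed: Replaces the per-block nested 2x2 marking loop inside the while/pop drain by building the set of all covered cell coordinates first and then zeroing/counting them in one flat pass over that set.
import Mathlib
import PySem

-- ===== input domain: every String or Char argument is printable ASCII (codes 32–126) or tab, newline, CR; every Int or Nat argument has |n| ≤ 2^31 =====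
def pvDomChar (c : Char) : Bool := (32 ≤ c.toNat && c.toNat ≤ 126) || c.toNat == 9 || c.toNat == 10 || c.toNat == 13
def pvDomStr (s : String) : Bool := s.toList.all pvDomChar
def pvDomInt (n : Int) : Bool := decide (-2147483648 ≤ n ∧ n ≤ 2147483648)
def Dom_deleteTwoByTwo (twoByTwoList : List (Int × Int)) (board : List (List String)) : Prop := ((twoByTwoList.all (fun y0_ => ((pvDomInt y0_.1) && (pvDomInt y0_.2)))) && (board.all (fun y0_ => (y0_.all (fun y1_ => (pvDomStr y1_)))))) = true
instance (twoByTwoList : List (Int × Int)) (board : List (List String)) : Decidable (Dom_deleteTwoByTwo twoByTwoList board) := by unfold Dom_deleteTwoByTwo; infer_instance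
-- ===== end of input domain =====

-- B builds the set of all covered cells first, then zeroes/counts in one flat pass,
-- instead of A's per-block nested 2x2 marking inside the while/pop drain; equal return
-- value proved (both Pythons also mutate board and empty twoByTwoList identically).

-- the shared one-cell body "if board[i][j] != '0': count += 1; board[i][j] = '0'"
-- (pyGetD/pySetD are exact under Pre_, which puts every touched index in range)
def zeroStep (st : Int × List (List String)) (i j : Int) : Int × List (List String) :=
  if PySem.List.pyGetD (PySem.List.pyGetD st.2 i []) j "0" ≠ "0" then
    (st.1 + 1, PySem.List.pySetD st.2 i (PySem.List.pySetD (PySem.List.pyGetD st.2 i []) j "0"))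
  else st

-- ===== PORT A =====
-- 'while twoByTwoList: x, y = twoByTwoList.pop()' consumes the list back-to-front:
-- recursion over the reversed list; the two 'for … in range(_, _ + 2)' loops are folds.
def deleteTwoByTwoGo : List (Int × Int) → Int × List (List String) → Int × List (List String)
  | [], st => st
  | p :: rest, st =>
      deleteTwoByTwoGo rest
        ((PySem.List.pyRange p.1 (p.1 + 2)).foldl
          (fun st1 i => (PySem.List.pyRange p.2 (p.2 + 2)).foldl (fun st2 j => zeroStep st2 i j) st1) st)

def deleteTwoByTwo (twoByTwoList : List (Int × Int)) (board : List (List String)) : Int :=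
  (deleteTwoByTwoGo twoByTwoList.reverse (0, board)).1

-- ===== PORT B =====
-- build the set of covered coordinates, then one flat counting pass over it
-- (the count does not depend on the set's iteration order: each distinct cell is
-- counted at most once either way)
def coveredCells (twoByTwoList : List (Int × Int)) : PySem.Set (Int × Int) :=
  twoByTwoList.foldl
    (fun s p => ((((s.add (p.1, p.2)).add (p.1, p.2 + 1)).add (p.1 + 1, p.2)).add (p.1 + 1, p.2 + 1)))
    PySem.Set.empty

def deleteTwoByTwo_alt (twoByTwoList : List (Int × Int)) (board : List (List String)) : Int :=
  ((coveredCells twoByTwoList).foldl (fun st c => zeroStep st c.1 c.2) ((0 : Int), board)).1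

-- ===== PRECONDITION & SPEC =====
-- the four corners of every block: (x,y), (x,y+1), (x+1,y), (x+1,y+1)
def coords4 (p : Int × Int) : List (Int × Int) :=
  [(p.1, p.2), (p.1, p.2 + 1), (p.1 + 1, p.2), (p.1 + 1, p.2 + 1)]

-- Pre_ excludes exactly the inputs on which A raises IndexError: every cell index
-- touched by some block must be valid Python indexing (negative wrap allowed).
def Pre_deleteTwoByTwo (twoByTwoList : List (Int × Int)) (board : List (List String)) : Prop :=
  ∀ p ∈ twoByTwoList, ∀ c ∈ coords4 p,
    ((PySem.List.pyGet? board c.1).bind (fun row => PySem.List.pyGet? row c.2)).isSome = true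

instance (twoByTwoList : List (Int × Int)) (board : List (List String)) : Decidable (Pre_deleteTwoByTwo twoByTwoList board) := by unfold Pre_deleteTwoByTwo; infer_instance

def pvWitness_deleteTwoByTwo : (List (Int × Int)) × List (List String) :=
  ([(0, 0)], [["1", "2"], ["3", "1"]])

def Spec_deleteTwoByTwo (twoByTwoList : List (Int × Int)) (board : List (List String)) (out : Int) : Prop := out = deleteTwoByTwo_alt twoByTwoList board
instance (twoByTwoList : List (Int × Int)) (board : List (List String)) (out : Int) : Decidable (Spec_deleteTwoByTwo twoByTwoList board out) := by unfold Spec_deleteTwoByTwo; infer_instance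

-- ===== CLAIM (what is proved, stated in full; the proofs are below) =====
def Claim_equal_deleteTwoByTwo : Prop := ∀ (twoByTwoList : List (Int × Int)) (board : List (List String)), Dom_deleteTwoByTwo twoByTwoList board → Pre_deleteTwoByTwo twoByTwoList board → Spec_deleteTwoByTwo twoByTwoList board (deleteTwoByTwo twoByTwoList board)

-- ===== LEMMAS AND PROOFS =====

-- the cell a raw (possibly negative) index pair denotes, on a board of b's shape
def ncell (b : List (List String)) (c : Int × Int) : Nat × Nat :=
  let i := (PySem.List.pyIdx? b.length c.1).getD 0
  (i, (PySem.List.pyIdx? (b.getD i []).length c.2).getD 0)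

def validC (b : List (List String)) (c : Int × Int) : Prop :=
  ((PySem.List.pyGet? b c.1).bind (fun row => PySem.List.pyGet? row c.2)).isSome = true

def getCell (b : List (List String)) (c : Nat × Nat) : String :=
  (b.getD c.1 []).getD c.2 "0"

def nstep (st : Int × List (List String)) (c : Nat × Nat) : Int × List (List String) :=
  if getCell st.2 c ≠ "0" then (st.1 + 1, st.2.set c.1 ((st.2.getD c.1 []).set c.2 "0"))
  else st

def shape (b : List (List String)) : List Nat := b.map List.length

theorem pyIdx?_lt {n : Nat} {i : Int} {k : Nat} (h : PySem.List.pyIdx? n i = some k) : k < n := by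
  unfold PySem.List.pyIdx? at h
  split_ifs at h <;> simp_all <;> omega

theorem shape_set_row (b : List (List String)) (k : Nat) (r : List String)
    (hr : r.length = (b.getD k []).length) : shape (b.set k r) = shape b := by
  unfold shape
  rw [List.map_set]
  by_cases hk : k < b.length
  · have h2 : r.length = b[k].length := by
      simpa [List.getD, List.getElem?_eq_getElem hk] using hr
    rw [show r.length = (b.map List.length)[k]'(by simpa using hk) from by simpa using h2,
      List.set_getElem_self]
  · rw [List.set_eq_of_length_le (by simpa using Nat.le_of_not_lt hk)]

theorem shape_nstep (st : Int × List (List String)) (c : Nat × Nat) :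
    shape (nstep st c).2 = shape st.2 := by
  unfold nstep
  split
  · exact shape_set_row _ _ _ (by simp)
  · rfl

theorem getD_shape (b : List (List String)) (k : Nat) :
    (shape b).getD k 0 = (b.getD k []).length := by
  by_cases hk : k < b.length
  · simp [shape, List.getD, List.getElem?_eq_getElem hk, List.getElem?_map]
  · simp [shape, List.getD, List.getElem?_eq_none_iff.mpr (Nat.le_of_not_lt hk)]

-- validity and the denoted cell depend only on the board's shape
def validS (s : List Nat) (c : Int × Int) : Prop :=
  PySem.Raise.InRange s.length c.1 ∧
    PySem.Raise.InRange (s.getD ((PySem.List.pyIdx? s.length c.1).getD 0) 0) c.2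

theorem validC_iff_shape (b : List (List String)) (c : Int × Int) :
    validC b c ↔ validS (shape b) c := by
  have hlen : (shape b).length = b.length := by simp [shape]
  unfold validC validS PySem.List.pyGet?
  rw [hlen]
  cases hik : PySem.List.pyIdx? b.length c.1 with
  | none =>
      have : ¬ PySem.Raise.InRange b.length c.1 := by
        have := (PySem.List.pyGet?_eq_none_iff b c.1).mp (by simp [PySem.List.pyGet?, hik])
        exact this
      simp [this]
  | some k =>
      have hk := pyIdx?_lt hik
      have hin : PySem.Raise.InRange b.length c.1 := by
        by_contra h
        have := (PySem.List.pyGet?_eq_none_iff b c.1).mpr h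
        simp [PySem.List.pyGet?, hik, List.getElem?_eq_getElem hk] at this
      simp only [Option.bind_some, Option.getD_some, List.getElem?_eq_getElem hk]
      rw [getD_shape]
      have hrow : b.getD k [] = b[k] := by simp [List.getD, List.getElem?_eq_getElem hk]
      rw [hrow]
      cases hjk : PySem.List.pyIdx? b[k].length c.2 with
      | none =>
          have : ¬ PySem.Raise.InRange b[k].length c.2 := by
            have := (PySem.List.pyGet?_eq_none_iff b[k] c.2).mp (by simp [PySem.List.pyGet?, hjk])
            exact this
          simp [hin, this]
      | some m =>
          have hm := pyIdx?_lt hjk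
          have : PySem.Raise.InRange b[k].length c.2 := by
            by_contra h
            have := (PySem.List.pyGet?_eq_none_iff b[k] c.2).mpr h
            simp [PySem.List.pyGet?, hjk, List.getElem?_eq_getElem hm] at this
          try simp [hin, this, List.getElem?_eq_getElem hm]

def ncellS (s : List Nat) (c : Int × Int) : Nat × Nat :=
  let i := (PySem.List.pyIdx? s.length c.1).getD 0
  (i, (PySem.List.pyIdx? (s.getD i 0) c.2).getD 0)

theorem ncell_eq_shape (b : List (List String)) (c : Int × Int) :
    ncell b c = ncellS (shape b) c := by
  unfold ncell ncellS
  have hlen : (shape b).length = b.length := by simp [shape]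
  simp only [hlen, getD_shape]

theorem validC_of_shape {b b' : List (List String)} (h : shape b' = shape b)
    {c : Int × Int} (hv : validC b c) : validC b' c := by
  rw [validC_iff_shape, h]
  rw [validC_iff_shape] at hv
  exact hv

theorem ncell_of_shape {b b' : List (List String)} (h : shape b' = shape b) (c : Int × Int) :
    ncell b' c = ncell b c := by
  rw [ncell_eq_shape, ncell_eq_shape, h]

theorem zeroStep_eq_nstep (st : Int × List (List String)) (c : Int × Int)
    (hv : validC st.2 c) : zeroStep st c.1 c.2 = nstep st (ncell st.2 c) := by
  obtain ⟨n, b⟩ := st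
  unfold validC PySem.List.pyGet? at hv
  cases hik : PySem.List.pyIdx? b.length c.1 with
  | none => rw [hik] at hv; simp at hv
  | some k =>
      rw [hik] at hv
      have hk := pyIdx?_lt hik
      simp only [Option.bind_some, List.getElem?_eq_getElem hk] at hv
      have hrowD : b.getD k [] = b[k] := by simp [List.getD, List.getElem?_eq_getElem hk]
      cases hjk : PySem.List.pyIdx? b[k].length c.2 with
      | none => rw [hjk] at hv; simp at hv
      | some m =>
          have hm := pyIdx?_lt hjk
          unfold zeroStep nstep getCell ncell
          simp only [PySem.List.pyGetD, PySem.List.pyGet?, PySem.List.pySetD, PySem.List.pySet?,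
            hik, Option.getD_some, Option.bind_some, Option.map_some,
            List.getElem?_eq_getElem hk, hrowD, hjk]
          have hgd : b[k][m]?.getD "0" = b[k].getD m "0" := by simp [List.getD]
          rw [hgd]

-- folding zeroStep over raw coordinates = folding nstep over the cells they denote
theorem fold_zeroStep_eq (cs : List (Int × Int)) (b : List (List String))
    (hv : ∀ c ∈ cs, validC b c) :
    ∀ (n : Int) (b' : List (List String)), shape b' = shape b →
      cs.foldl (fun st c => zeroStep st c.1 c.2) (n, b')
        = (cs.map (ncell b)).foldl nstep (n, b') := by
  induction cs with
  | nil => intro n b' _; rfl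
  | cons c cs ih =>
      intro n b' hsh
      have hvc : validC b' c := validC_of_shape hsh (hv c (by simp))
      simp only [List.foldl_cons, List.map_cons]
      rw [zeroStep_eq_nstep (n, b') c hvc, ncell_of_shape hsh]
      have hsh2 : shape (nstep (n, b') (ncell b c)).2 = shape b := by
        rw [shape_nstep]; exact hsh
      have hrw : nstep (n, b') (ncell b c) = ((nstep (n, b') (ncell b c)).1, (nstep (n, b') (ncell b c)).2) := rfl
      rw [hrw]
      exact ih (fun x hx => hv x (by simp [hx])) _ _ hsh2

theorem getCell_after_set (b : List (List String)) (c c' : Nat × Nat)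
    (hk : c.1 < b.length) (hm : c.2 < (b.getD c.1 []).length) :
    getCell (b.set c.1 ((b.getD c.1 []).set c.2 "0")) c' =
      if c' = c then "0" else getCell b c' := by
  obtain ⟨i, j⟩ := c
  obtain ⟨i', j'⟩ := c'
  simp only at hk hm
  unfold getCell
  by_cases h1 : i' = i
  · subst h1
    have hrow : (b.set i' ((b.getD i' []).set j "0")).getD i' [] = (b.getD i' []).set j "0" := by
      simp [List.getD, List.getElem?_set_self hk]
    rw [hrow]
    by_cases h2 : j' = j
    · subst h2
      rw [List.getD_eq_getElem?_getD, List.getElem?_set_self (by simpa [List.getD_eq_getElem?_getD] using hm)]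
      simp
    · simp only [Prod.mk.injEq, h2, and_false, if_false]
      simp [List.getD, List.getElem?_set_ne (fun h => h2 h.symm)]
  · simp only [Prod.mk.injEq, h1, false_and, if_false]
    simp [List.getD, List.getElem?_set_ne (fun h => h1 h.symm)]

theorem toFinset_filter_ne {α : Type} [DecidableEq α] (l : List α) (a : α) (p : α → Bool) :
    (l.filter (fun x => p x && decide (x ≠ a))).toFinset = (l.filter p).toFinset.erase a := by
  ext x
  simp only [List.mem_toFinset, List.mem_filter, Finset.mem_erase, Bool.and_eq_true,
    decide_eq_true_eq]
  tauto

-- the counting lemma: the mark-and-count fold counts the distinct initially-hot cells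
theorem fold_nstep_count (cs : List (Nat × Nat)) :
    ∀ (b : List (List String)) (n : Int),
      (cs.foldl nstep (n, b)).1
        = n + ((cs.filter (fun c => decide (getCell b c ≠ "0"))).toFinset.card : Int) := by
  induction cs with
  | nil => intro b n; simp
  | cons c cs ih =>
      intro b n
      simp only [List.foldl_cons]
      by_cases hc : getCell b c ≠ "0"
      · have hk : c.1 < b.length := by
          by_contra h
          apply hc
          unfold getCell
          have hnone : b.getD c.1 [] = [] := by
            rw [List.getD_eq_getElem?_getD, List.getElem?_eq_none_iff.mpr (by omega)]
            rfl
          rw [hnone]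
          rfl
        have hm : c.2 < (b.getD c.1 []).length := by
          by_contra h
          apply hc
          unfold getCell
          rw [List.getD_eq_getElem?_getD (l := b.getD c.1 []),
            List.getElem?_eq_none_iff.mpr (by omega)]
          rfl
        have hstep : nstep (n, b) c = (n + 1, b.set c.1 ((b.getD c.1 []).set c.2 "0")) := by
          unfold nstep; simp [hc]
        rw [hstep, ih]
        have hfilter : cs.filter (fun c' => decide (getCell (b.set c.1 ((b.getD c.1 []).set c.2 "0")) c' ≠ "0"))
            = cs.filter (fun c' => decide (getCell b c' ≠ "0") && decide (c' ≠ c)) := by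
          apply List.filter_congr
          intro x _
          rw [getCell_after_set b c x hk hm]
          by_cases hx : x = c <;> simp [hx, hc]
        rw [hfilter, toFinset_filter_ne]
        have hhead : ((c :: cs).filter (fun c' => decide (getCell b c' ≠ "0"))).toFinset
            = insert c (cs.filter (fun c' => decide (getCell b c' ≠ "0"))).toFinset := by
          simp [hc]
        rw [hhead]
        set s := (cs.filter (fun c' => decide (getCell b c' ≠ "0"))).toFinset with hs
        by_cases hmem : c ∈ s
        · rw [Finset.insert_eq_self.mpr hmem]
          have := Finset.card_erase_add_one hmem
          omega
        · rw [Finset.card_insert_of_notMem hmem, Finset.erase_eq_of_notMem hmem]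
          omega
      · have hstep : nstep (n, b) c = (n, b) := by unfold nstep; simp at hc; simp [hc]
        rw [hstep, ih]
        simp [hc]

-- A's nested 2x2 loops are the fold over coords4
theorem inner_eq_coords4 (p : Int × Int) (st : Int × List (List String)) :
    (PySem.List.pyRange p.1 (p.1 + 2)).foldl
      (fun st1 i => (PySem.List.pyRange p.2 (p.2 + 2)).foldl (fun st2 j => zeroStep st2 i j) st1) st
    = (coords4 p).foldl (fun st c => zeroStep st c.1 c.2) st := by
  rw [PySem.List.pyRange_one_cons (by omega : p.1 < p.1 + 2),
      PySem.List.pyRange_one_cons (by omega : p.1 + 1 < p.1 + 2),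
      PySem.List.pyRange_one_eq_nil (by omega : p.1 + 2 ≤ p.1 + 1 + 1),
      PySem.List.pyRange_one_cons (by omega : p.2 < p.2 + 2),
      PySem.List.pyRange_one_cons (by omega : p.2 + 1 < p.2 + 2),
      PySem.List.pyRange_one_eq_nil (by omega : p.2 + 2 ≤ p.2 + 1 + 1)]
  simp [coords4]

theorem go_eq_flatMap (ls : List (Int × Int)) :
    ∀ st, deleteTwoByTwoGo ls st
      = (ls.flatMap coords4).foldl (fun st c => zeroStep st c.1 c.2) st := by
  induction ls with
  | nil => intro st; rfl
  | cons p rest ih =>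
      intro st
      simp only [deleteTwoByTwoGo, List.flatMap_cons, List.foldl_append]
      rw [inner_eq_coords4, ih]

theorem mem_coveredCells (l : List (Int × Int)) (x : Int × Int) :
    x ∈ coveredCells l ↔ x ∈ l.flatMap coords4 := by
  unfold coveredCells
  suffices h : ∀ (s : PySem.Set (Int × Int)),
      (x ∈ l.foldl (fun s p => ((((s.add (p.1, p.2)).add (p.1, p.2 + 1)).add (p.1 + 1, p.2)).add (p.1 + 1, p.2 + 1))) s
        ↔ x ∈ s ∨ x ∈ l.flatMap coords4) by
    simpa [PySem.Set.empty] using h PySem.Set.empty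
  induction l with
  | nil => intro s; simp
  | cons p rest ih =>
      intro s
      simp only [List.foldl_cons, List.flatMap_cons]
      rw [ih]
      simp only [PySem.Set.mem_add, coords4, List.mem_append, List.mem_cons,
        List.not_mem_nil, or_false]
      tauto

theorem same_finset {α β : Type} [DecidableEq β] (l1 l2 : List α) (f : α → β) (p : β → Bool)
    (h : ∀ x, x ∈ l1 ↔ x ∈ l2) :
    ((l1.map f).filter p).toFinset = ((l2.map f).filter p).toFinset := by
  ext y
  simp only [List.mem_toFinset, List.mem_filter, List.mem_map]
  constructor <;> rintro ⟨⟨x, hx, rfl⟩, hp⟩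
  · exact ⟨⟨x, (h x).mp hx, rfl⟩, hp⟩
  · exact ⟨⟨x, (h x).mpr hx, rfl⟩, hp⟩

-- ===== VERDICT (by name: the statement is the Claim_ definition above) =====
theorem deleteTwoByTwo_spec : Claim_equal_deleteTwoByTwo := by
  intro l board _ hpre
  unfold Spec_deleteTwoByTwo deleteTwoByTwo deleteTwoByTwo_alt
  have hvalid : ∀ c ∈ l.flatMap coords4, validC board c := by
    intro c hc
    rw [List.mem_flatMap] at hc
    obtain ⟨p, hp, hcp⟩ := hc
    exact hpre p hp c hcp
  have hvalidA : ∀ c ∈ l.reverse.flatMap coords4, validC board c := by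
    intro c hc
    rw [List.mem_flatMap] at hc
    obtain ⟨p, hp, hcp⟩ := hc
    exact hvalid c (List.mem_flatMap.mpr ⟨p, List.mem_reverse.mp hp, hcp⟩)
  have hvalidB : ∀ c ∈ (coveredCells l : List (Int × Int)), validC board c := by
    intro c hc
    exact hvalid c ((mem_coveredCells l c).mp hc)
  rw [go_eq_flatMap,
      fold_zeroStep_eq _ _ hvalidA 0 board rfl,
      fold_zeroStep_eq _ _ hvalidB 0 board rfl,
      fold_nstep_count, fold_nstep_count]
  congr 1
  have := same_finset (l.reverse.flatMap coords4) (coveredCells l) (ncell board)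
    (fun c => decide (getCell board c ≠ "0"))
    (by intro x; rw [mem_coveredCells]; simp [List.mem_flatMap])
  rw [this]
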